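-- pv_equiv track=rewrite | github.com/DLuCJ/miscellaneous | pals/AESinECB.py | get_repetitions
-- ===== SOURCE A (Python) =====
-- def get_repetitions(bytes):
--     score = 0
--     seen = []
--     matchbytes = [bytes[i:i + 16] for i in range(0, len(bytes), 16)]
--     for match in matchbytes:
--         for cand in seen:
--             if match == cand:
--                 score += 1
--         seen.append(match)
--     return score
-- ===== SOURCE B (Python) =====
-- def get_repetitions(bytes):
--     blocks = sorted(bytes[i:i + 16] for i in range(0, len(bytes), 16))
--     if not blocks:
--         return 0
--     score = 0
--     prev = blocks[0]
--     run = 1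
--     for b in blocks[1:]:
--         if b == prev:
--             run += 1
--         else:
--             score += run * (run - 1) // 2
--             run = 1
--         prev = b
--     return score + run * (run - 1) // 2
-- ===== Notes on version B (the rewrite author's own statement) =====
-- stated objective: faster
-- what changed: Replaces A's quadratic scan of every block against all previously seen blocks with sorting the block list once and summing r*(r-1)//2 over maximal runs of equal consecutive blocks.
import Mathlib
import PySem

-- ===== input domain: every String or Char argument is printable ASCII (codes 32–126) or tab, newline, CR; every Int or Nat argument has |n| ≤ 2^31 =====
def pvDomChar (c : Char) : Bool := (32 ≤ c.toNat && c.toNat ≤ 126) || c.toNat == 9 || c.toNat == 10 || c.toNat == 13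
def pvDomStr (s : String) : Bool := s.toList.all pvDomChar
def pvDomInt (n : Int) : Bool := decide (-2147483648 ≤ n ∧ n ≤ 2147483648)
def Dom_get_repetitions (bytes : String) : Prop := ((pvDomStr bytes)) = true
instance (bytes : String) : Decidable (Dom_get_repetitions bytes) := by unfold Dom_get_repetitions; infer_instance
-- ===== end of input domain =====

-- B replaces A's scan of each 16-byte block against all previously seen blocks by sorting
-- the block list once and summing run*(run-1)//2 over maximal runs of equal consecutive blocks.

-- ===== PORT A =====
def get_repetitions (bytes : String) : Int :=
  ((((PySem.List.pyRange 0 (PySem.Str.len bytes) 16).map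
      (fun i => PySem.Str.slice bytes (some i) (some (i + 16)))).foldl
    (fun (st : Int × List String) m =>
      (st.2.foldl (fun sc cand => if m = cand then sc + 1 else sc) st.1, st.2 ++ [m]))
    ((0 : Int), ([] : List String))).1 : Int)

-- ===== PORT B =====
-- the run-length loop of Source B: prev = last block seen, run = current run length, score = accumulator
def pvRunPass : List String → String → Int → Int → Int
  | [], _, run, score => score + PySem.Int.floordiv (run * (run - 1)) 2
  | b :: rest, prev, run, score =>
      if b = prev then pvRunPass rest b (run + 1) score
      else pvRunPass rest b 1 (score + PySem.Int.floordiv (run * (run - 1)) 2)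

def get_repetitions_alt (bytes : String) : Int :=
  match PySem.List.sorted ((PySem.List.pyRange 0 (PySem.Str.len bytes) 16).map
      (fun i => PySem.Str.slice bytes (some i) (some (i + 16)))) (fun x => x) false with
  | [] => 0
  | x :: rest => pvRunPass rest x 1 0

-- ===== PRECONDITION & SPEC =====
def Spec_get_repetitions (bytes : String) (out : Int) : Prop := out = get_repetitions_alt bytes
instance (bytes : String) (out : Int) : Decidable (Spec_get_repetitions bytes out) := by unfold Spec_get_repetitions; infer_instance

-- ===== CLAIM (what is proved, stated in full; the proofs are below) =====
def Claim_equal_get_repetitions : Prop := ∀ (bytes : String), Dom_get_repetitions bytes → Spec_get_repetitions bytes (get_repetitions bytes)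

-- ===== LEMMAS AND PROOFS =====

-- number of equal (earlier, later) pairs in a list, by recursion on the head
def pvPairs : List String → Int
  | [] => 0
  | x :: l => (l.count x : Int) + pvPairs l

lemma pvPairs_perm {l₁ l₂ : List String} (h : l₁.Perm l₂) : pvPairs l₁ = pvPairs l₂ := by
  induction h with
  | nil => rfl
  | cons x h ih => simp [pvPairs, ih, h.count_eq]
  | swap x y l =>
      simp only [pvPairs, List.count_cons]
      by_cases hxy : x = y
      · subst hxy; push_cast; ring
      · have h1 : (x == y) = false := by simp [hxy]
        have h2 : (y == x) = false := by simp [Ne.symm hxy]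
        simp only [h1, h2, Bool.false_eq_true, if_false]
        push_cast; ring
  | trans _ _ ih1 ih2 => exact ih1.trans ih2

-- A's nested loop computes the pair count plus the matches against the already-seen prefix
lemma pvAloop (l : List String) : ∀ (seen : List String) (score : Int),
    (l.foldl
      (fun (st : Int × List String) m =>
        (st.2.foldl (fun sc cand => if m = cand then sc + 1 else sc) st.1, st.2 ++ [m]))
      (score, seen)).1
    = score + (l.map (fun x => (seen.count x : Int))).sum + pvPairs l := by
  induction l with
  | nil => intro seen score; simp [pvPairs]
  | cons m rest ih =>
      intro seen score
      have hin : seen.foldl (fun sc cand => if m = cand then sc + 1 else sc) score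
          = score + (seen.count m : Int) := by
        rw [PySem.List.foldl_ite_add_one (fun cand => m = cand) seen score,
            List.countP_congr (l := seen) (p := fun x => decide (m = x)) (q := fun x => x == m)
              (fun x _ => by simp only [decide_eq_true_eq, beq_iff_eq]; exact eq_comm)]
        rfl
      have hone : ∀ x : String, (((seen ++ [m]).count x : Nat) : Int)
          = (seen.count x : Int) + (if m = x then 1 else 0) := by
        intro x; by_cases h : m = x <;> simp [List.count_append, h]
      have hsum : ∀ t : List String,
          (t.map (fun x => ((seen ++ [m]).count x : Int))).sum
            = (t.map (fun x => (seen.count x : Int))).sum + (t.count m : Int) := by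
        intro t; induction t with
        | nil => simp
        | cons y t iht =>
            simp only [List.map_cons, List.sum_cons, iht, hone y, List.count_cons]
            by_cases hy : m = y
            · simp only [hy, beq_self_eq_true, if_true]
              push_cast; ring
            · have hb : (y == m) = false := by simp [Ne.symm hy]
              simp only [if_neg hy, hb, Bool.false_eq_true, if_false]
              push_cast; ring
      simp only [List.foldl_cons, hin, ih, pvPairs, List.map_cons, List.sum_cons, hsum]
      ring

-- run*(run-1)//2 grows by run when the run is extended
lemma pvFd_step (run : Int) :
    PySem.Int.floordiv ((run + 1) * run) 2 = PySem.Int.floordiv (run * (run - 1)) 2 + run := by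
  rw [PySem.Int.floordiv_eq_ediv_of_pos (by norm_num), PySem.Int.floordiv_eq_ediv_of_pos (by norm_num)]
  have h : (run + 1) * run = run * (run - 1) + 2 * run := by ring
  omega

-- invariant of B's run-length pass on a sorted tail
lemma pvRunPass_eq : ∀ (l : List String) (prev : String) (run score : Int),
    1 ≤ run → l.Pairwise (· ≤ ·) → (∀ z ∈ l, prev ≤ z) →
    pvRunPass l prev run score
      = score + PySem.Int.floordiv (run * (run - 1)) 2 + pvPairs l + run * (l.count prev : Int) := by
  intro l
  induction l with
  | nil => intro prev run score _ _ _; simp [pvRunPass, pvPairs]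
  | cons b rest ih =>
      intro prev run score hrun hpw hle
      have hpw' := List.pairwise_cons.mp hpw
      by_cases hb : b = prev
      · subst hb
        rw [pvRunPass, if_pos rfl, ih b (run + 1) score (by omega) hpw'.2 hpw'.1]
        have he : (run + 1) * (run + 1 - 1) = (run + 1) * run := by ring
        rw [he, pvFd_step]
        simp only [pvPairs, List.count_cons_self]
        push_cast; ring
      · rw [pvRunPass, if_neg hb,
            ih b 1 (score + PySem.Int.floordiv (run * (run - 1)) 2) le_rfl hpw'.2 hpw'.1]
        have hnm : prev ∉ b :: rest := by
          intro hmem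
          rcases List.mem_cons.mp hmem with h | h
          · exact hb h.symm
          · exact hb (le_antisymm (hpw'.1 prev h) (hle b List.mem_cons_self))
        have hc0 : (b :: rest).count prev = 0 := List.count_eq_zero_of_not_mem hnm
        rw [hc0]
        simp only [pvPairs]
        have h0 : PySem.Int.floordiv (1 * (1 - 1)) 2 = 0 := by decide
        rw [h0]
        push_cast; ring

-- ===== VERDICT (by name: the statement is the Claim_ definition above) =====
theorem get_repetitions_spec : Claim_equal_get_repetitions := by
  intro bytes _
  unfold Spec_get_repetitions get_repetitions get_repetitions_alt
  set mb := (PySem.List.pyRange 0 (PySem.Str.len bytes) 16).map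
      (fun i => PySem.Str.slice bytes (some i) (some (i + 16))) with hmb
  have hA : (mb.foldl
      (fun (st : Int × List String) m =>
        (st.2.foldl (fun sc cand => if m = cand then sc + 1 else sc) st.1, st.2 ++ [m]))
      ((0 : Int), ([] : List String))).1 = pvPairs mb := by
    rw [pvAloop mb [] 0]; simp
  cases hs : PySem.List.sorted mb (fun x => x) false with
  | nil =>
    have h0 : mb = [] := (PySem.List.sorted_eq_nil_iff mb (fun x => x) false).mp hs
    rw [h0]
    rfl
  | cons x rest =>
    rw [hA]
    show pvPairs mb = pvRunPass rest x 1 0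
    have hperm : (x :: rest).Perm mb := hs ▸ PySem.List.sorted_perm mb (fun x => x) false
    have hpw : (x :: rest).Pairwise (fun a b => a ≤ b) := by
      have hp := PySem.List.sorted_pairwise mb (fun x => x)
      rw [hs] at hp; exact hp
    have hpw' := List.pairwise_cons.mp hpw
    rw [pvRunPass_eq rest x 1 0 le_rfl hpw'.2 hpw'.1]
    have h0 : PySem.Int.floordiv (1 * (1 - 1)) 2 = 0 := by decide
    rw [h0, ← pvPairs_perm hperm]
    simp only [pvPairs]
    push_cast; ring
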